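-- pv_equiv track=rewrite | github.com/HdeBos/h_rag | backend/src/h_rag/data_processing/data_processor.py | _get_chunk_pages
-- ===== SOURCE A (Python) =====
-- import bisect
--
-- def _get_chunk_pages(
--     chunks: list[str], full_text: str, page_offsets: list[int]
-- ) -> list[int]:
--     """Map each chunk to its page number using a breadcrumb search."""
--     pages = []
--     pos = 0
--     for chunk in chunks:
--         idx = full_text.find(chunk[:40], pos)
--         page = bisect.bisect_right(page_offsets, max(idx, 0)) - 1
--         pages.append(page + 1)
--         pos = max(idx, pos)
--     return pages
-- ===== SOURCE B (Python) =====
-- def _get_chunk_pages(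
--     chunks: list[str], full_text: str, page_offsets: list[int]
-- ) -> list[int]:
--     """Map each chunk to its page number using a breadcrumb search."""
--     # Offsets are nondecreasing page starts; pos only moves forward, so one
--     # pointer swept over page_offsets serves all found chunks (two pointers),
--     # while unfound chunks (idx == -1) always map to the page containing 0.
--     zero_count = sum(1 for o in page_offsets if o <= 0)
--     pages = []
--     pos = 0
--     k = zero_count  # number of offsets <= pos
--     for chunk in chunks:
--         idx = full_text.find(chunk[:40], pos)
--         if idx < 0:
--             pages.append(zero_count)
--         else:
--             while k < len(page_offsets) and page_offsets[k] <= idx: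
--                 k += 1
--             pages.append(k)
--             pos = idx
--     return pages
-- ===== Notes on version B (the rewrite author's own statement) =====
-- stated objective: alternative
-- what changed: The per-chunk bisect_right binary search (and its page-1/page+1 round-trip) is replaced by a single forward pointer swept over the sorted page offsets across all chunks (two pointers, exploiting that the search position only advances), with a precomputed count for unfound chunks; the bisect import is dropped.
-- outside the precondition, e.g. on _get_chunk_pages(['a'], 'a', [0, 5, -1]): A returns [1], B returns [3]
import Mathlib
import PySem

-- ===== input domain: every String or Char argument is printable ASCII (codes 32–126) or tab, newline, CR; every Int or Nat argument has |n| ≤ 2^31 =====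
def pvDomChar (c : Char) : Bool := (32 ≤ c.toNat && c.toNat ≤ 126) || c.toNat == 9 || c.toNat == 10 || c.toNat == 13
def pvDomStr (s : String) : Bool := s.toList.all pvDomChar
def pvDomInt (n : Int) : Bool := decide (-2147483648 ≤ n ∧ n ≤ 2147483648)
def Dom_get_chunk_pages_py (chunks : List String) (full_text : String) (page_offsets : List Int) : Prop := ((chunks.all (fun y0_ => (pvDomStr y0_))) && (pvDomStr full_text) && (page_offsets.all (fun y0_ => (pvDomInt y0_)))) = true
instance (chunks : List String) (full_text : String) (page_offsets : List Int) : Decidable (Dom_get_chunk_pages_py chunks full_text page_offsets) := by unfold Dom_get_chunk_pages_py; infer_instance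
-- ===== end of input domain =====

-- B replaces A's per-chunk bisect_right binary search by one forward pointer swept over the
-- sorted page offsets across all chunks (two pointers; the search position only advances).

-- ===== PORT A =====
def get_chunk_pages_py (chunks : List String) (full_text : String) (page_offsets : List Int) : List Int :=
  (chunks.foldl (fun (st : List Int × Int) chunk =>
      let idx := PySem.Str.findFrom full_text (PySem.Str.slice chunk none (some 40)) st.2
      let page : Int := (PySem.List.bisectRight page_offsets (max idx 0) : Int) - 1
      (st.1 ++ [page + 1], max idx st.2)) ([], 0)).1

-- ===== PORT B =====
-- Source B's 'while k < len(page_offsets) and page_offsets[k] <= idx: k += 1' as structural recursion.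
def pvAdvance (offsets : List Int) (v : Int) (k : Nat) : Nat :=
  if h : k < offsets.length then
    if offsets[k] ≤ v then pvAdvance offsets v (k + 1) else k
  else k
termination_by offsets.length - k

def get_chunk_pages_py_alt (chunks : List String) (full_text : String) (page_offsets : List Int) : List Int :=
  let zero_count : Nat := page_offsets.countP (fun o => decide (o ≤ 0))
  (chunks.foldl (fun (st : List Int × Int × Nat) chunk =>
      let idx := PySem.Str.findFrom full_text (PySem.Str.slice chunk none (some 40)) st.2.1
      if idx < 0 then (st.1 ++ [(zero_count : Int)], st.2.1, st.2.2)
      else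
        let k := pvAdvance page_offsets idx st.2.2
        (st.1 ++ [(k : Int)], idx, k)) ([], 0, zero_count)).1

-- ===== PRECONDITION & SPEC =====
-- Pre_ restricts to nondecreasing page_offsets: that is bisect's documented contract and the
-- natural domain (offsets are cumulative page start positions); on unsorted lists A's binary
-- search returns a value that is an artefact of the search path, which B does not reproduce.
def Pre_get_chunk_pages_py (chunks : List String) (full_text : String) (page_offsets : List Int) : Prop :=
  page_offsets.Pairwise (· ≤ ·)
instance (chunks : List String) (full_text : String) (page_offsets : List Int) : Decidable (Pre_get_chunk_pages_py chunks full_text page_offsets) := by unfold Pre_get_chunk_pages_py; infer_instance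

def pvWitness_get_chunk_pages_py : List String × String × List Int := (["ab"], "xab", [0, 2])

def Spec_get_chunk_pages_py (chunks : List String) (full_text : String) (page_offsets : List Int) (out : List Int) : Prop := out = get_chunk_pages_py_alt chunks full_text page_offsets
instance (chunks : List String) (full_text : String) (page_offsets : List Int) (out : List Int) : Decidable (Spec_get_chunk_pages_py chunks full_text page_offsets out) := by unfold Spec_get_chunk_pages_py; infer_instance

-- ===== CLAIM (what is proved, stated in full; the proofs are below) =====
def Claim_equal_get_chunk_pages_py : Prop := ∀ (chunks : List String) (full_text : String) (page_offsets : List Int), Dom_get_chunk_pages_py chunks full_text page_offsets → Pre_get_chunk_pages_py chunks full_text page_offsets → Spec_get_chunk_pages_py chunks full_text page_offsets (get_chunk_pages_py chunks full_text page_offsets)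

-- ===== LEMMAS AND PROOFS =====

-- On a nondecreasing list, bisect_right equals the count of elements ≤ x.
lemma countP_eq_bisectRight (xs : List Int) (x : Int) (h : xs.Pairwise (· ≤ ·)) :
    xs.countP (fun o => decide (o ≤ x)) = PySem.List.bisectRight xs x := by
  obtain ⟨hk, hlo, hhi⟩ := PySem.List.bisectRight_spec xs x h
  set k := PySem.List.bisectRight xs x with hkdef
  have h1 : (xs.take k).countP (fun o => decide (o ≤ x)) = (xs.take k).length := by
    rw [List.countP_eq_length]
    intro a ha
    obtain ⟨i, hi, rfl⟩ := List.mem_iff_getElem.mp ha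
    simp only [List.length_take] at hi
    rw [List.getElem_take]
    exact decide_eq_true (hlo i (by omega) (by omega))
  have h2 : (xs.drop k).countP (fun o => decide (o ≤ x)) = 0 := by
    rw [List.countP_eq_zero]
    intro a ha
    obtain ⟨i, hi, rfl⟩ := List.mem_iff_getElem.mp ha
    simp only [List.length_drop] at hi
    rw [List.getElem_drop]
    have := hhi (k + i) (by omega) (by omega)
    simp only [decide_eq_true_eq]
    omega
  conv_lhs => rw [← List.take_append_drop k xs]
  rw [List.countP_append, h1, h2, List.length_take]
  omega

lemma bisectRight_mono (xs : List Int) (h : xs.Pairwise (· ≤ ·)) {a b : Int} (hab : a ≤ b) :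
    PySem.List.bisectRight xs a ≤ PySem.List.bisectRight xs b := by
  obtain ⟨hka, hloa, hhia⟩ := PySem.List.bisectRight_spec xs a h
  obtain ⟨hkb, hlob, hhib⟩ := PySem.List.bisectRight_spec xs b h
  by_contra hc
  simp only [not_le] at hc
  have h1 := hloa (PySem.List.bisectRight xs b) (by omega) hc
  have h2 := hhib (PySem.List.bisectRight xs b) (by omega) (le_refl _)
  omega

lemma pvAdvance_eq (xs : List Int) (v : Int) (h : xs.Pairwise (· ≤ ·)) :
    ∀ (n k : Nat), xs.length - k ≤ n → k ≤ PySem.List.bisectRight xs v →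
      pvAdvance xs v k = PySem.List.bisectRight xs v := by
  obtain ⟨hc, hlo, hhi⟩ := PySem.List.bisectRight_spec xs v h
  set c := PySem.List.bisectRight xs v with hcdef
  intro n
  induction n with
  | zero =>
    intro k h1 h2
    rw [pvAdvance]
    rw [dif_neg (by omega)]
    omega
  | succ n ih =>
    intro k h1 h2
    rw [pvAdvance]
    by_cases hkl : k < xs.length
    · rw [dif_pos hkl]
      by_cases hv : xs[k] ≤ v
      · rw [if_pos hv]
        have hkc : k < c := by
          by_contra hge
          have := hhi k hkl (by omega)
          omega
        exact ih (k + 1) (by omega) (by omega)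
      · rw [if_neg hv]
        have : ¬ k < c := fun hlt => hv (hlo k hkl hlt)
        omega
    · rw [dif_neg hkl]
      omega

-- The loop invariant: B's pointer k always equals bisect_right(page_offsets, pos).
lemma fold_inv (ft : String) (po : List Int) (hpo : po.Pairwise (· ≤ ·)) :
    ∀ (l : List String) (pages : List Int) (pos : Int) (k : Nat),
      0 ≤ pos → pos ≤ (ft.toList.length : Int) → k = PySem.List.bisectRight po pos →
      (l.foldl (fun (st : List Int × Int × Nat) chunk =>
          let idx := PySem.Str.findFrom ft (PySem.Str.slice chunk none (some 40)) st.2.1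
          if idx < 0 then (st.1 ++ [((po.countP (fun o => decide (o ≤ 0)) : Nat) : Int)], st.2.1, st.2.2)
          else
            let k := pvAdvance po idx st.2.2
            (st.1 ++ [(k : Int)], idx, k)) (pages, pos, k)).1
      = (l.foldl (fun (st : List Int × Int) chunk =>
          let idx := PySem.Str.findFrom ft (PySem.Str.slice chunk none (some 40)) st.2
          let page : Int := (PySem.List.bisectRight po (max idx 0) : Int) - 1
          (st.1 ++ [page + 1], max idx st.2)) (pages, pos)).1 := by
  intro l
  induction l with
  | nil => intro pages pos k _ _ _; rfl
  | cons c t ih =>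
    intro pages pos k hpos hposlen hk
    simp only [List.foldl_cons]
    have hidx : PySem.Str.findFrom ft (PySem.Str.slice c none (some 40)) pos = -1 ∨
        (pos ≤ PySem.Str.findFrom ft (PySem.Str.slice c none (some 40)) pos ∧
         PySem.Str.findFrom ft (PySem.Str.slice c none (some 40)) pos ≤ (ft.toList.length : Int)) := by
      have hcast : pos = ((pos.toNat : Nat) : Int) := by omega
      rw [hcast]
      simp only [PySem.Str.findFrom_eq]
      rw [PySem.Chars.findFrom_natCast _ _ pos.toNat (by omega)]
      split
      · exact Or.inl rfl
      · right
        have h1 := PySem.Chars.neg_one_le_find (ft.toList.drop pos.toNat) (PySem.Str.slice c none (some 40)).toList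
        have h2 := PySem.Chars.find_le_length (ft.toList.drop pos.toNat) (PySem.Str.slice c none (some 40)).toList
        simp only [List.length_drop] at h2
        constructor <;> omega
    set idx := PySem.Str.findFrom ft (PySem.Str.slice c none (some 40)) pos with hidxdef
    by_cases hneg : idx < 0
    · have hm1 : idx = -1 := by
        rcases hidx with h | ⟨h1, h2⟩
        · exact h
        · omega
      rw [hm1]
      rw [if_pos (show (-1 : Int) < 0 from by norm_num)]
      rw [show max (-1 : Int) 0 = 0 from by omega,
          show max (-1 : Int) pos = pos from by omega]
      rw [show ((PySem.List.bisectRight po 0 : Nat) : Int) - 1 + 1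
            = ((po.countP (fun o => decide (o ≤ 0)) : Nat) : Int) from by
        rw [countP_eq_bisectRight po 0 hpo]; omega]
      exact ih _ pos k hpos hposlen hk
    · have hpair : pos ≤ idx ∧ idx ≤ (ft.toList.length : Int) := by
        rcases hidx with h | h
        · omega
        · exact h
      obtain ⟨hge, hle⟩ := hpair
      rw [if_neg hneg]
      rw [show max idx 0 = idx from by omega, show max idx pos = idx from by omega]
      have hadv : pvAdvance po idx k = PySem.List.bisectRight po idx := by
        apply pvAdvance_eq po idx hpo po.length k (by omega)
        rw [hk]
        exact bisectRight_mono po hpo hge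
      rw [hadv]
      rw [show ((PySem.List.bisectRight po idx : Nat) : Int) - 1 + 1
            = ((PySem.List.bisectRight po idx : Nat) : Int) from by omega]
      exact ih _ idx _ (by omega) hle rfl

-- ===== VERDICT (by name: the statement is the Claim_ definition above) =====
theorem get_chunk_pages_py_spec : Claim_equal_get_chunk_pages_py := by
  intro chunks full_text page_offsets _hdom hpre
  unfold Spec_get_chunk_pages_py get_chunk_pages_py get_chunk_pages_py_alt
  refine (fold_inv full_text page_offsets hpre chunks [] 0 _ (by omega) (by omega) ?_).symm
  have := countP_eq_bisectRight page_offsets 0 hpre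
  omega
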